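-- pv_equiv track=rewrite | github.com/cloudfieldcz/shieldoo-gate | scanner-bridge/extractors_diff/_common.py | is_path_traversal
-- ===== SOURCE A (Python) =====
-- def is_path_traversal(path: str) -> bool:
--     """Reject members that try to escape the archive root.
--
--     Catches POSIX traversal, absolute paths, Windows drive prefixes, and
--     backslash-separated traversal (cross-platform archives sometimes use \\).
--
--     Note: symlinks and hardlinks are a related-but-distinct attack surface —
--     they're filtered separately in the per-ecosystem extractor (e.g. the
--     `_read_tar` symlink/hardlink skip in pypi.py), since this function only
--     inspects the member name string.
--     """
--     p = path.replace("\\", "/")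
--     # Strip leading "./" prefix(es) only — do NOT use lstrip(chars) here
--     # because that would also eat leading ".." which is the very thing we
--     # want to detect (e.g. "../../etc/passwd").
--     while p.startswith("./"):
--         p = p[2:]
--     if (
--         p.startswith("../")
--         or "/../" in p
--         or p == ".."
--         or p.endswith("/..")
--         or p == ""
--     ):
--         return True
--     if path.startswith("/") or path.startswith("\\"):
--         return True
--     # Windows drive prefix: "C:foo" or "C:\\foo"
--     if len(path) >= 2 and path[1] == ":" and path[0].isalpha():
--         return True
--     return False
-- ===== SOURCE B (Python) =====
-- def is_path_traversal(path: str) -> bool: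
--     # Absolute path or backslash-absolute.
--     if path.startswith(('/', '\\')):
--         return True
--     # Windows drive prefix: "C:foo" or "C:\\foo".
--     if len(path) >= 2 and path[1] == ':' and path[0].isalpha():
--         return True
--     # Component view: traversal iff some component is "..", or the name
--     # collapses to nothing (empty, or only "./" prefixes).
--     comps = path.replace('\\', '/').split('/')
--     return '..' in comps or (comps[-1] == '' and all(c == '.' for c in comps[:-1]))
-- ===== Notes on version B (the rewrite author's own statement) =====
-- stated objective: simpler
-- what changed: B drops A's prefix-stripping while-loop and the four positional dot-dot substring probes (startswith / substring-in / equality / endswith) and instead splits the normalized name once into slash-separated components, testing traversal by component membership of dot-dot and the collapses-to-nothing case as last-component-empty with all earlier components a single dot; the absolute-path and drive-prefix checks are hoisted to the front.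
import Mathlib
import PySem

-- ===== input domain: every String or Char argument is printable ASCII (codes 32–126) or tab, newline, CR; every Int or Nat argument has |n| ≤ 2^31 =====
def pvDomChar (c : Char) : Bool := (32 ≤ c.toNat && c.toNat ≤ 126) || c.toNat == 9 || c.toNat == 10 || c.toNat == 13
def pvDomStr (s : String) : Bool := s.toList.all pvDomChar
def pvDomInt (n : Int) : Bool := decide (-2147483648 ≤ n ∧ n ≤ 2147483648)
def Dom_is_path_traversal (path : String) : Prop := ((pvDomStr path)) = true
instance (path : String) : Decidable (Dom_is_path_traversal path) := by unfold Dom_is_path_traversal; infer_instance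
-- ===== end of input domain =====

-- B replaces A's "./"-stripping loop and four positional ".." substring probes by one split into
-- '/'-components with a component-membership test (objective: simpler).

-- ===== PORT A =====
-- the `while p.startswith("./"): p = p[2:]` loop
def stripDotSlash (p : List Char) : List Char :=
  if h : PySem.Chars.startswith p ['.', '/'] = true then
    stripDotSlash (PySem.List.slice p (some 2) none)
  else p
termination_by p.length
decreasing_by
  have hp : ['.', '/'] <+: p := (PySem.Chars.startswith_iff _ _).mp h
  have h2 : 2 ≤ p.length := by simpa using hp.length_le
  rw [PySem.List.slice_from p (by norm_num : (0:Int) ≤ 2)]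
  simp
  omega

def is_path_traversal (path : String) : Bool :=
  let p := stripDotSlash (PySem.Str.replace path "\\" "/").toList
  if PySem.Chars.startswith p ['.', '.', '/'] || PySem.Chars.isIn ['/', '.', '.', '/'] p
      || p == ['.', '.'] || PySem.Chars.endswith p ['/', '.', '.'] || p == ([] : List Char) then
    true
  else if PySem.Str.startswith path "/" || PySem.Str.startswith path "\\" then
    true
  else if (decide (2 ≤ path.toList.length)) && (PySem.List.pyGet? path.toList 1 == some ':')
      && ((PySem.List.pyGet? path.toList 0).map PySem.Chars.isalpha == some true) then
    true
  else
    false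

-- ===== PORT B =====
def is_path_traversal_alt (path : String) : Bool :=
  if PySem.Chars.startswith path.toList ['/'] || PySem.Chars.startswith path.toList ['\\'] then
    true
  else if (decide (2 ≤ path.toList.length)) && (PySem.List.pyGet? path.toList 1 == some ':')
      && ((PySem.List.pyGet? path.toList 0).map PySem.Chars.isalpha == some true) then
    true
  else
    let comps := (PySem.Str.replace path "\\" "/").toList.splitOn '/'
    comps.contains ['.', '.'] || (comps.getLast? == some ([] : List Char) && comps.dropLast.all (· == ['.']))

-- ===== PRECONDITION & SPEC =====
def Spec_is_path_traversal (path : String) (out : Bool) : Prop := out = is_path_traversal_alt path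
instance (path : String) (out : Bool) : Decidable (Spec_is_path_traversal path out) := by unfold Spec_is_path_traversal; infer_instance

-- ===== CLAIM (what is proved, stated in full; the proofs are below) =====
def Claim_equal_is_path_traversal : Prop := ∀ (path : String), Dom_is_path_traversal path → Spec_is_path_traversal path (is_path_traversal path)

-- ===== LEMMAS AND PROOFS =====

theorem ic_single {α : Type} (x : α) (a : List α) : [x].intercalate [a] = a := by
  simp [List.intercalate, List.intersperse]

theorem ic_cons {α : Type} (x : α) (a : List α) (rest : List (List α)) (h : rest ≠ []) :
    [x].intercalate (a :: rest) = a ++ x :: [x].intercalate rest := by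
  obtain ⟨b, t, rfl⟩ := List.exists_cons_of_ne_nil h
  simp [List.intercalate, List.intersperse]

theorem ic_append {α : Type} (x : α) (l m : List (List α)) (hl : l ≠ []) (hm : m ≠ []) :
    [x].intercalate (l ++ m) = [x].intercalate l ++ x :: [x].intercalate m := by
  induction l with
  | nil => simp at hl
  | cons a t ih =>
    rcases t with _ | ⟨b, t'⟩
    · rw [List.singleton_append, ic_cons x a m hm, ic_single]
    · rw [List.cons_append, ic_cons x a _ (by simp), ih (by simp),
        ic_cons x a _ (by simp), List.append_assoc, List.cons_append]

theorem splitOn_singleton {α : Type} [DecidableEq α] (x : α) (a : List α) (h : x ∉ a) :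
    a.splitOn x = [a] := by
  simp only [List.splitOn]
  refine List.splitOnP_eq_single _ _ (fun y hy => ?_)
  simp only [beq_iff_eq]
  intro rfl'
  exact h (rfl' ▸ hy)

theorem splitOn_append_cons {α : Type} [DecidableEq α] (x : α) (u v : List α) :
    (u ++ x :: v).splitOn x = u.splitOn x ++ v.splitOn x := by
  simp only [List.splitOn]
  exact List.splitOnP_append_cons _ u v x (by simp)

theorem mem_splitOn_dotdot (p : List Char) :
    ['.','.'] ∈ p.splitOn '/' ↔
      ['.','.','/'] <+: p ∨ ['/','.','.','/'] <:+: p ∨ p = ['.','.'] ∨ ['/','.','.'] <:+ p := by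
  constructor
  · intro hmem
    obtain ⟨l₁, l₂, hsplit⟩ := List.append_of_mem hmem
    have hp : p = ['/'].intercalate (p.splitOn '/') := (List.intercalate_splitOn p '/').symm
    rw [hsplit] at hp
    rcases eq_or_ne l₁ [] with rfl | hl₁
    · rcases eq_or_ne l₂ [] with rfl | hl₂
      · right; right; left
        rw [List.nil_append, ic_single] at hp
        exact hp
      · left
        rw [List.nil_append, ic_cons '/' _ _ hl₂] at hp
        exact ⟨['/'].intercalate l₂, by simp [hp]⟩
    · rcases eq_or_ne l₂ [] with rfl | hl₂
      · right; right; right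
        rw [ic_append '/' l₁ _ hl₁ (by simp), ic_single] at hp
        exact ⟨['/'].intercalate l₁, by simp [hp]⟩
      · right; left
        rw [ic_append '/' l₁ _ hl₁ (by simp), ic_cons '/' _ _ hl₂] at hp
        exact ⟨['/'].intercalate l₁, ['/'].intercalate l₂, by simp [hp]⟩
  · rintro (⟨t, rfl⟩ | ⟨u, v, rfl⟩ | rfl | ⟨u, rfl⟩)
    · rw [show ['.','.','/'] ++ t = ['.','.'] ++ '/' :: t by simp,
        splitOn_append_cons, splitOn_singleton '/' ['.','.'] (by decide)]
      simp
    · rw [show u ++ ['/','.','.','/'] ++ v = u ++ '/' :: (['.','.'] ++ '/' :: v) by simp,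
        splitOn_append_cons, splitOn_append_cons, splitOn_singleton '/' ['.','.'] (by decide)]
      simp
    · rw [splitOn_singleton '/' ['.','.'] (by decide)]; simp
    · rw [show u ++ ['/','.','.'] = u ++ '/' :: ['.','.'] by simp,
        splitOn_append_cons, splitOn_singleton '/' ['.','.'] (by decide)]
      simp

theorem splitOn_cons_sep (t : List Char) : (('/' : Char) :: t).splitOn '/' = [] :: t.splitOn '/' := by
  simp [List.splitOn, List.splitOnP_cons]

theorem splitOn_cons_ne (c : Char) (hc : c ≠ '/') (t : List Char) :
    (c :: t).splitOn '/' = (t.splitOn '/').modifyHead (c :: ·) := by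
  simp [List.splitOn, List.splitOnP_cons, hc]

theorem splitOn_ne_nil (p : List Char) : p.splitOn '/' ≠ [] := List.splitOnP_ne_nil _ p

theorem splitOn_eq_nil_iff (p : List Char) : p.splitOn '/' = [[]] ↔ p = [] := by
  constructor
  · intro h
    have hp : p = ['/'].intercalate (p.splitOn '/') := (List.intercalate_splitOn p '/').symm
    rw [h] at hp
    simpa [List.intercalate, List.intersperse] using hp
  · rintro rfl; rfl

theorem splitOn_dot_slash (t : List Char) :
    (('.' : Char) :: '/' :: t).splitOn '/' = ['.'] :: t.splitOn '/' := by
  rw [splitOn_cons_ne '.' (by decide), splitOn_cons_sep]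
  rfl

-- head component ['.'] with at least two components forces a "./" prefix
theorem head_dot_forces (p : List Char) (hlen : 2 ≤ (p.splitOn '/').length)
    (hh : (p.splitOn '/').head? = some ['.']) : ∃ t, p = '.' :: '/' :: t := by
  match p with
  | [] => simp at hlen
  | '/' :: t => rw [splitOn_cons_sep] at hh; simp at hh
  | c :: t =>
    by_cases hc : c = '/'
    · subst hc; rw [splitOn_cons_sep] at hh; simp at hh
    · rw [splitOn_cons_ne c hc] at hh hlen
      obtain ⟨h, r, hr⟩ := List.exists_cons_of_ne_nil (splitOn_ne_nil t)
      rw [hr] at hh hlen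
      simp at hh hlen
      obtain ⟨rfl, hhe⟩ := hh
      -- r ≠ []
      have hrne : r ≠ [] := by
        intro hre; rw [hre] at hlen; simp at hlen
      -- splitOn t = [] :: r forces t = '/' :: t'
      subst hhe
      match t, hr with
      | [], hr => simp [List.splitOn] at hr; exact absurd hr hrne
      | '/' :: t', _ => exact ⟨t', rfl⟩
      | c' :: t', hr =>
        by_cases hc' : c' = '/'
        · subst hc'; exact ⟨t', rfl⟩
        · rw [splitOn_cons_ne c' hc'] at hr
          obtain ⟨h', r', hr'⟩ := List.exists_cons_of_ne_nil (splitOn_ne_nil t')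
          rw [hr'] at hr
          simp at hr

def Bc (l : List (List Char)) : Prop :=
  ['.','.'] ∈ l ∨ (l.getLast? = some [] ∧ ∀ x ∈ l.dropLast, x = ['.'])

theorem Bc_cons (r : List (List Char)) (hr : r ≠ []) : Bc (['.'] :: r) ↔ Bc r := by
  obtain ⟨b, r', rfl⟩ := List.exists_cons_of_ne_nil hr
  unfold Bc
  simp [List.getLast?_cons_cons]

theorem strip_step (t : List Char) :
    stripDotSlash ('.' :: '/' :: t) = stripDotSlash t := by
  rw [stripDotSlash]
  rw [dif_pos (by rw [PySem.Chars.startswith_iff]; exact ⟨t, rfl⟩)]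
  rw [PySem.List.slice_from _ (by norm_num : (0:Int) ≤ 2)]
  rfl

theorem strip_base (cs : List Char) (h : ¬ (['.', '/'] <+: cs)) :
    (['.','.'] ∈ cs.splitOn '/' ∨ cs = []) ↔ Bc (cs.splitOn '/') := by
  constructor
  · rintro (hm | rfl)
    · exact Or.inl hm
    · exact Or.inr (by simp)
  · rintro (hm | ⟨hlast, hdots⟩)
    · exact Or.inl hm
    · right
      obtain ⟨hd, r, hr⟩ := List.exists_cons_of_ne_nil (splitOn_ne_nil cs)
      rcases eq_or_ne r [] with rfl | hrne
      · rw [hr] at hlast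
        simp at hlast
        subst hlast
        exact (splitOn_eq_nil_iff cs).mp hr
      · exfalso
        have hhd : hd = ['.'] := by
          apply hdots
          rw [hr]
          obtain ⟨b, r', rfl⟩ := List.exists_cons_of_ne_nil hrne
          simp
        have hlen : 2 ≤ (cs.splitOn '/').length := by
          rw [hr]
          obtain ⟨b, r', rfl⟩ := List.exists_cons_of_ne_nil hrne
          simp
        have hh : (cs.splitOn '/').head? = some ['.'] := by rw [hr, hhd]; rfl
        obtain ⟨t, rfl⟩ := head_dot_forces cs hlen hh
        exact h ⟨t, rfl⟩

theorem strip_char_aux : ∀ (n : Nat) (cs : List Char), cs.length ≤ n →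
    ((['.','.'] ∈ (stripDotSlash cs).splitOn '/' ∨ stripDotSlash cs = []) ↔ Bc (cs.splitOn '/')) := by
  intro n
  induction n with
  | zero =>
    intro cs hcs
    have : cs = [] := List.length_eq_zero_iff.mp (Nat.le_zero.mp hcs)
    subst this
    rw [show stripDotSlash [] = [] by rw [stripDotSlash]; rfl]
    exact strip_base [] (by simp [List.prefix_iff_eq_take])
  | succ n ih =>
    intro cs hcs
    by_cases h : ['.', '/'] <+: cs
    · obtain ⟨t, rfl⟩ := h
      rw [List.cons_append, List.cons_append, List.nil_append] at *
      rw [strip_step, splitOn_dot_slash]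
      rw [Bc_cons _ (splitOn_ne_nil t)]
      exact ih t (by simp at hcs; omega)
    · rw [show stripDotSlash cs = cs by rw [stripDotSlash]; rw [dif_neg]; simp [PySem.Chars.startswith_iff, h]]
      exact strip_base cs h

theorem strip_char (cs : List Char) :
    (['.','.'] ∈ (stripDotSlash cs).splitOn '/' ∨ stripDotSlash cs = []) ↔ Bc (cs.splitOn '/') :=
  strip_char_aux cs.length cs le_rfl

theorem condA_iff (q : List Char) :
    (PySem.Chars.startswith q ['.', '.', '/'] || PySem.Chars.isIn ['/', '.', '.', '/'] q
      || q == ['.', '.'] || PySem.Chars.endswith q ['/', '.', '.'] || q == ([] : List Char)) = true ↔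
    (['.','.'] ∈ q.splitOn '/' ∨ q = []) := by
  simp only [Bool.or_eq_true, PySem.Chars.startswith_iff, PySem.Chars.isIn_iff_infix,
    PySem.Chars.endswith_iff, beq_iff_eq, mem_splitOn_dotdot]
  tauto

theorem condB_iff (cs : List Char) :
    ((cs.splitOn '/').contains ['.', '.']
      || ((cs.splitOn '/').getLast? == some ([] : List Char)
          && (cs.splitOn '/').dropLast.all (· == ['.']))) = true ↔ Bc (cs.splitOn '/') := by
  simp only [Bool.or_eq_true, Bool.and_eq_true, List.contains_eq_mem, decide_eq_true_eq,
    beq_iff_eq, List.all_eq_true, Bc]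

theorem cond_eq (cs : List Char) :
    (PySem.Chars.startswith (stripDotSlash cs) ['.', '.', '/']
      || PySem.Chars.isIn ['/', '.', '.', '/'] (stripDotSlash cs)
      || stripDotSlash cs == ['.', '.']
      || PySem.Chars.endswith (stripDotSlash cs) ['/', '.', '.']
      || stripDotSlash cs == ([] : List Char)) =
    ((cs.splitOn '/').contains ['.', '.']
      || ((cs.splitOn '/').getLast? == some ([] : List Char)
          && (cs.splitOn '/').dropLast.all (· == ['.']))) := by
  rw [Bool.eq_iff_iff, condA_iff, condB_iff]
  exact strip_char cs

-- ===== VERDICT (by name: the statement is the Claim_ definition above) =====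
theorem is_path_traversal_spec : Claim_equal_is_path_traversal := by
  intro path _
  unfold Spec_is_path_traversal is_path_traversal is_path_traversal_alt
  simp only [PySem.Str.startswith_eq]
  simp only [show ("/" : String).toList = ['/'] from rfl, show ("\\" : String).toList = ['\\'] from rfl]
  simp only [cond_eq]
  set b1 := ((PySem.Str.replace path "\\" "/").toList.splitOn '/').contains ['.', '.']
      || (((PySem.Str.replace path "\\" "/").toList.splitOn '/').getLast? == some ([] : List Char)
          && ((PySem.Str.replace path "\\" "/").toList.splitOn '/').dropLast.all (· == ['.'])) with hb1
  set b2 := PySem.Chars.startswith path.toList ['/'] || PySem.Chars.startswith path.toList ['\\'] with hb2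
  set b3 := (decide (2 ≤ path.toList.length)) && (PySem.List.pyGet? path.toList 1 == some ':')
      && ((PySem.List.pyGet? path.toList 0).map PySem.Chars.isalpha == some true) with hb3
  cases b1 <;> cases b2 <;> cases b3 <;> simp
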